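-- pv_equiv track=rewrite | github.com/hnjae/dotfiles | profiles/common/xdg-config-home/yazi/lib/generate-keymap.py | ordered_items
-- ===== SOURCE A (Python) =====
-- def ordered_items(entry: dict[str, object]) -> list[tuple[str, object]]:
--     items = []
--     seen = set()
--
--     for key in ("on", "run", "desc"):
--         if key in entry:
--             items.append((key, entry[key]))
--             seen.add(key)
--
--     for key, value in entry.items():
--         if key not in seen:
--             items.append((key, value))
--
--     return items
-- ===== SOURCE B (Python) =====
-- def ordered_items(entry: dict[str, object]) -> list[tuple[str, object]]:
--     rank = {"on": 0, "run": 1, "desc": 2}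
--     return sorted(entry.items(), key=lambda kv: rank.get(kv[0], 3))
-- ===== Notes on version B (the rewrite author's own statement) =====
-- stated objective: idiomatic
-- what changed: Replaces the two explicit passes with a seen-set by a single stable sort of the items keyed on a priority rank (on=0, run=1, desc=2, other=3); Pre_ excludes association lists with duplicate keys, which a Python dict cannot represent.
import Mathlib
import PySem

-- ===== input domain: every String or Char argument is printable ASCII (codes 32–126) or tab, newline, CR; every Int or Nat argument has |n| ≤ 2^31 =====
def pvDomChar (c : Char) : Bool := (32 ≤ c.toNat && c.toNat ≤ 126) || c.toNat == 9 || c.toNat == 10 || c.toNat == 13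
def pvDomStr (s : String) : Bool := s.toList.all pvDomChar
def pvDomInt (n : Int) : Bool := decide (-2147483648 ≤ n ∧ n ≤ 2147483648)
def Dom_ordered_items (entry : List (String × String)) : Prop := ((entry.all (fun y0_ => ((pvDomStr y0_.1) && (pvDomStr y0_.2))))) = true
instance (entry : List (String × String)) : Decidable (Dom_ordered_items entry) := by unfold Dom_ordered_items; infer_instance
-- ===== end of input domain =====

-- B orders the dict items by a single stable sort on a priority rank (on=0, run=1, desc=2, other=3)
-- instead of A's two passes with a seen-set; same return value on every duplicate-free association list.


-- ===== PORT A =====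
-- the literal tuple ("on", "run", "desc") A iterates over
def pvPriority : List String := ["on", "run", "desc"]

-- 'key in entry' / 'entry[key]' on a dict = first (only) match in the association list
def ordered_items (entry : List (String × String)) : List (String × String) :=
  let s :=
    pvPriority.foldl
      (fun (acc : List (String × String) × PySem.Set String) key =>
        match entry.find? (fun kv => kv.1 == key) with
        | some kv => (acc.1 ++ [(key, kv.2)], PySem.Set.add acc.2 key)
        | none => acc)
      ([], PySem.Set.empty)
  entry.foldl
    (fun items kv => if PySem.Set.contains s.2 kv.1 then items else items ++ [kv]) s.1

-- ===== PORT B =====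
-- rank = {"on": 0, "run": 1, "desc": 2}
def pvRankDict : PySem.Dict String Int :=
  PySem.Dict.ofList [("on", (0 : Int)), ("run", 1), ("desc", 2)]

def ordered_items_alt (entry : List (String × String)) : List (String × String) :=
  PySem.List.sorted entry (fun kv => pvRankDict.getD kv.1 3) false

-- ===== PRECONDITION & SPEC =====
-- A's argument is a Python dict, which cannot hold two pairs with the same key; Pre_ excludes
-- exactly the association lists with duplicate keys, which do not represent any input of A.
def Pre_ordered_items (entry : List (String × String)) : Prop :=
  (entry.map Prod.fst).Nodup
instance (entry : List (String × String)) : Decidable (Pre_ordered_items entry) := by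
  unfold Pre_ordered_items; infer_instance

def pvWitness_ordered_items : (List (String × String)) :=
  [("run", "a"), ("zz", "b"), ("on", "c")]

def Spec_ordered_items (entry : List (String × String)) (out : List (String × String)) : Prop := out = ordered_items_alt entry
instance (entry : List (String × String)) (out : List (String × String)) : Decidable (Spec_ordered_items entry out) := by unfold Spec_ordered_items; infer_instance

-- ===== CLAIM (what is proved, stated in full; the proofs are below) =====
def Claim_equal_ordered_items : Prop := ∀ (entry : List (String × String)), Dom_ordered_items entry → Pre_ordered_items entry → Spec_ordered_items entry (ordered_items entry)

-- ===== LEMMAS AND PROOFS =====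

-- the rank function, written out
def pvRank (k : String) : Int :=
  if k = "on" then 0 else if k = "run" then 1 else if k = "desc" then 2 else 3

theorem pvRank_eq (k : String) : pvRankDict.getD k 3 = pvRank k := by
  have hd : pvRankDict = PySem.Dict.mk [("on", 0), ("run", 1), ("desc", 2)] := by decide
  unfold pvRank
  by_cases h0 : k = "on"
  · subst h0; decide
  by_cases h1 : k = "run"
  · subst h1; decide
  by_cases h2 : k = "desc"
  · subst h2; decide
  simp [hd, PySem.Dict.getD, PySem.Dict.get?_mk_cons, h0, h1, h2,
    (by simpa using (Ne.symm h0) : ("on" == k) = false),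
    (by simpa using (Ne.symm h1) : ("run" == k) = false),
    (by simpa using (Ne.symm h2) : ("desc" == k) = false), PySem.Dict.get?, PySem.Dict.mk]

theorem insertBy_append_of_not_before {α : Type} (before : α → α → Bool) (x : α)
    (l t : List α) (h : ∀ y ∈ l, before x y = false) :
    PySem.List.insertBy before x (l ++ t) = l ++ PySem.List.insertBy before x t := by
  induction l with
  | nil => simp
  | cons y ys ih =>
      simp only [List.cons_append, PySem.List.insertBy, h y (by simp), Bool.false_eq_true,
        if_false]
      rw [ih (fun z hz => h z (by simp [hz]))]

theorem insertBy_place {α : Type} (before : α → α → Bool) (x : α) (l r : List α)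
    (hl : ∀ y ∈ l, before x y = false) (hr : ∀ y ∈ r, before x y = true) :
    PySem.List.insertBy before x (l ++ r) = l ++ x :: r := by
  rw [insertBy_append_of_not_before before x l r hl]
  cases r with
  | nil => simp [PySem.List.insertBy]
  | cons y ys => simp [PySem.List.insertBy, hr y (by simp)]

-- the stable sort by pvRank is the concatenation of the four rank buckets
theorem foldl_ins_bucket (l B0 B1 B2 B3 : List (String × String))
    (h0 : ∀ y ∈ B0, pvRank y.1 = 0) (h1 : ∀ y ∈ B1, pvRank y.1 = 1)
    (h2 : ∀ y ∈ B2, pvRank y.1 = 2) (h3 : ∀ y ∈ B3, pvRank y.1 = 3) :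
    l.foldl (fun acc x => PySem.List.insertBy
        (fun a b => decide (pvRank a.1 < pvRank b.1)) x acc) (B0 ++ B1 ++ B2 ++ B3) =
      (B0 ++ l.filter (fun kv => pvRank kv.1 == 0)) ++ (B1 ++ l.filter (fun kv => pvRank kv.1 == 1))
        ++ (B2 ++ l.filter (fun kv => pvRank kv.1 == 2)) ++ (B3 ++ l.filter (fun kv => pvRank kv.1 == 3)) := by
  induction l generalizing B0 B1 B2 B3 with
  | nil => simp
  | cons x t ih =>
      have hx4 : pvRank x.1 = 0 ∨ pvRank x.1 = 1 ∨ pvRank x.1 = 2 ∨ pvRank x.1 = 3 := by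
        unfold pvRank; split_ifs <;> simp
      simp only [List.foldl_cons]
      rcases hx4 with hx | hx | hx | hx
      · have hl : ∀ y ∈ (B0), (decide (pvRank x.1 < pvRank y.1)) = false := by
          intro y hy
          simp only [List.mem_append] at hy
          simp [hx, h0 y hy]
        have hr' : ∀ y ∈ (B1 ++ B2 ++ B3), (decide (pvRank x.1 < pvRank y.1)) = true := by
          intro y hy
          simp only [List.mem_append] at hy
          rcases hy with (hy|hy)|hy
          · simp [hx, h1 y hy]
          · simp [hx, h2 y hy]
          · simp [hx, h3 y hy]
        have hB0 : ∀ y ∈ B0 ++ [x], pvRank y.1 = 0 := by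
          intro y hy
          rcases List.mem_append.mp hy with hy | hy
          · exact h0 y hy
          · simp at hy; subst hy; exact hx
        have hins : PySem.List.insertBy (fun a b => decide (pvRank a.1 < pvRank b.1)) x
            (B0 ++ B1 ++ B2 ++ B3) = (B0 ++ [x]) ++ B1 ++ B2 ++ B3 := by
          have h := insertBy_place (fun a b => decide (pvRank a.1 < pvRank b.1)) x
            (B0) (B1 ++ B2 ++ B3) hl hr'
          simp only [List.append_assoc] at h ⊢
          simp [h]
        rw [hins, ih (B0 ++ [x]) B1 B2 B3 hB0 h1 h2 h3]
        simp only [List.filter_cons, hx]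
        simp [List.append_assoc]
      · have hl : ∀ y ∈ (B0 ++ B1), (decide (pvRank x.1 < pvRank y.1)) = false := by
          intro y hy
          simp only [List.mem_append] at hy
          rcases hy with hy|hy
          · simp [hx, h0 y hy]
          · simp [hx, h1 y hy]
        have hr' : ∀ y ∈ (B2 ++ B3), (decide (pvRank x.1 < pvRank y.1)) = true := by
          intro y hy
          simp only [List.mem_append] at hy
          rcases hy with hy|hy
          · simp [hx, h2 y hy]
          · simp [hx, h3 y hy]
        have hB1 : ∀ y ∈ B1 ++ [x], pvRank y.1 = 1 := by
          intro y hy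
          rcases List.mem_append.mp hy with hy | hy
          · exact h1 y hy
          · simp at hy; subst hy; exact hx
        have hins : PySem.List.insertBy (fun a b => decide (pvRank a.1 < pvRank b.1)) x
            (B0 ++ B1 ++ B2 ++ B3) = B0 ++ (B1 ++ [x]) ++ B2 ++ B3 := by
          have h := insertBy_place (fun a b => decide (pvRank a.1 < pvRank b.1)) x
            (B0 ++ B1) (B2 ++ B3) hl hr'
          simp only [List.append_assoc] at h ⊢
          simp [h]
        rw [hins, ih B0 (B1 ++ [x]) B2 B3 h0 hB1 h2 h3]
        simp only [List.filter_cons, hx]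
        simp [List.append_assoc]
      · have hl : ∀ y ∈ (B0 ++ B1 ++ B2), (decide (pvRank x.1 < pvRank y.1)) = false := by
          intro y hy
          simp only [List.mem_append] at hy
          rcases hy with (hy|hy)|hy
          · simp [hx, h0 y hy]
          · simp [hx, h1 y hy]
          · simp [hx, h2 y hy]
        have hr' : ∀ y ∈ (B3), (decide (pvRank x.1 < pvRank y.1)) = true := by
          intro y hy
          simp only [List.mem_append] at hy
          simp [hx, h3 y hy]
        have hB2 : ∀ y ∈ B2 ++ [x], pvRank y.1 = 2 := by
          intro y hy
          rcases List.mem_append.mp hy with hy | hy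
          · exact h2 y hy
          · simp at hy; subst hy; exact hx
        have hins : PySem.List.insertBy (fun a b => decide (pvRank a.1 < pvRank b.1)) x
            (B0 ++ B1 ++ B2 ++ B3) = B0 ++ B1 ++ (B2 ++ [x]) ++ B3 := by
          have h := insertBy_place (fun a b => decide (pvRank a.1 < pvRank b.1)) x
            (B0 ++ B1 ++ B2) (B3) hl hr'
          simp only [List.append_assoc] at h ⊢
          simp [h]
        rw [hins, ih B0 B1 (B2 ++ [x]) B3 h0 h1 hB2 h3]
        simp only [List.filter_cons, hx]
        simp [List.append_assoc]
      · have hl : ∀ y ∈ (B0 ++ B1 ++ B2 ++ B3), (decide (pvRank x.1 < pvRank y.1)) = false := by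
          intro y hy
          simp only [List.mem_append] at hy
          rcases hy with ((hy|hy)|hy)|hy
          · simp [hx, h0 y hy]
          · simp [hx, h1 y hy]
          · simp [hx, h2 y hy]
          · simp [hx, h3 y hy]
        have hr' : ∀ y ∈ (([] : List (String × String))), (decide (pvRank x.1 < pvRank y.1)) = true := by
          intro y hy
          simp at hy
        have hB3 : ∀ y ∈ B3 ++ [x], pvRank y.1 = 3 := by
          intro y hy
          rcases List.mem_append.mp hy with hy | hy
          · exact h3 y hy
          · simp at hy; subst hy; exact hx
        have hins : PySem.List.insertBy (fun a b => decide (pvRank a.1 < pvRank b.1)) x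
            (B0 ++ B1 ++ B2 ++ B3) = B0 ++ B1 ++ B2 ++ (B3 ++ [x]) := by
          have h := insertBy_place (fun a b => decide (pvRank a.1 < pvRank b.1)) x
            (B0 ++ B1 ++ B2 ++ B3) (([] : List (String × String))) hl hr'
          simp only [List.append_nil] at h
          simp only [List.append_assoc] at h ⊢
          simp [h]
        rw [hins, ih B0 B1 B2 (B3 ++ [x]) h0 h1 h2 hB3]
        simp only [List.filter_cons, hx]
        simp [List.append_assoc]

theorem sorted_eq_buckets (entry : List (String × String)) :
    ordered_items_alt entry =
      entry.filter (fun kv => pvRank kv.1 == 0) ++ entry.filter (fun kv => pvRank kv.1 == 1)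
        ++ entry.filter (fun kv => pvRank kv.1 == 2) ++ entry.filter (fun kv => pvRank kv.1 == 3) := by
  have hkey : (fun kv : String × String => pvRankDict.getD kv.1 3) = fun kv => pvRank kv.1 :=
    funext fun kv => pvRank_eq kv.1
  unfold ordered_items_alt
  rw [hkey, PySem.List.sorted_eq_foldl_insertBy]
  have h := foldl_ins_bucket entry [] [] [] [] (by simp) (by simp) (by simp) (by simp)
  simpa [List.append_assoc] using h

-- under Nodup keys the bucket of key k is the singleton found by find?, or empty
theorem filter_key_nodup (entry : List (String × String)) (k : String)
    (h : (entry.map Prod.fst).Nodup) :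
    entry.filter (fun kv => kv.1 == k) =
      (match entry.find? (fun kv => kv.1 == k) with
       | some kv => [(k, kv.2)] | none => []) := by
  induction entry with
  | nil => simp
  | cons kv t ih =>
      rw [List.map_cons] at h
      obtain ⟨hout, ht⟩ := List.nodup_cons.mp h
      by_cases hk : kv.1 = k
      · have hb : (kv.1 == k) = true := by simpa using hk
        have hft : t.filter (fun z => z.1 == k) = [] := by
          apply List.filter_eq_nil_iff.mpr
          intro z hz hzk
          exact hout (by rw [hk, ← eq_of_beq hzk]; exact List.mem_map.mpr ⟨z, hz, rfl⟩)
        simp [List.filter_cons, List.find?_cons, hb, hft, ← hk]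
        intro a b hab hak
        exact hout (by rw [← hak]; exact List.mem_map.mpr ⟨(a, b), hab, rfl⟩)
      · have hb : (kv.1 == k) = false := by simpa using hk
        simp only [List.filter_cons, List.find?_cons, hb, cond_false, Bool.false_eq_true, if_false]
        exact ih ht

theorem foldl_skip_if {α : Type} (q : α → Bool) (l : List α) (acc : List α) :
    l.foldl (fun acc x => if q x then acc else acc ++ [x]) acc = acc ++ l.filter (fun x => !q x) := by
  induction l generalizing acc with
  | nil => simp
  | cons y ys ih =>
      by_cases h : q y <;> simp [h, ih]

-- the rank buckets are exactly the priority-key filters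
theorem pvRank_pred0 : (fun kv : String × String => pvRank kv.1 == (0 : Int)) = (fun kv => kv.1 == "on") := by
  funext kv; unfold pvRank; split_ifs <;> simp_all

theorem pvRank_pred1 : (fun kv : String × String => pvRank kv.1 == (1 : Int)) = (fun kv => kv.1 == "run") := by
  funext kv; unfold pvRank; split_ifs <;> simp_all

theorem pvRank_pred2 : (fun kv : String × String => pvRank kv.1 == (2 : Int)) = (fun kv => kv.1 == "desc") := by
  funext kv; unfold pvRank; split_ifs <;> simp_all

theorem second_loop_filter (entry : List (String × String)) (seen : PySem.Set String)
    (h : ∀ kv ∈ entry, (PySem.Set.contains seen kv.1 = true ↔ ¬ pvRank kv.1 = 3)) :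
    entry.filter (fun kv => !(PySem.Set.contains seen kv.1)) =
      entry.filter (fun kv => pvRank kv.1 == 3) := by
  apply List.filter_congr
  intro kv hkv
  cases hc : PySem.Set.contains seen kv.1 with
  | false =>
      have h3 : pvRank kv.1 = 3 := by
        by_contra hne
        have := (h kv hkv).mpr hne
        rw [hc] at this
        exact Bool.false_ne_true this
      simp only [Bool.not_false] at *
      simp [PySem.Set.contains] at hc
      simp [hc, h3]
  | true =>
      have h3 := (h kv hkv).mp hc
      simp [PySem.Set.contains] at hc
      simp [hc, h3]

-- ===== VERDICT (by name: the statement is the Claim_ definition above) =====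
set_option maxRecDepth 8192 in
theorem ordered_items_spec : Claim_equal_ordered_items := by
  intro entry _ hpre
  unfold Spec_ordered_items
  rw [sorted_eq_buckets, pvRank_pred0, pvRank_pred1, pvRank_pred2,
    filter_key_nodup entry "on" hpre, filter_key_nodup entry "run" hpre,
    filter_key_nodup entry "desc" hpre]
  unfold ordered_items pvPriority
  simp only [List.foldl_cons, List.foldl_nil]
  rcases hon : List.find? (fun kv => kv.1 == "on") entry with _ | a <;>
    rcases hrun : List.find? (fun kv => kv.1 == "run") entry with _ | b <;>
    rcases hdesc : List.find? (fun kv => kv.1 == "desc") entry with _ | c <;>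
    simp only [hon, hrun, hdesc] <;> rw [foldl_skip_if]
  next =>
    have hs : ∀ kv ∈ entry, (PySem.Set.contains PySem.Set.empty kv.1 = true ↔ ¬ pvRank kv.1 = 3) := by
      intro kv hkv
      have hkon : kv.1 ≠ "on" := by
        intro hzk
        have hz := List.find?_eq_none.mp hon kv hkv
        simp [hzk] at hz
      have hkrun : kv.1 ≠ "run" := by
        intro hzk
        have hz := List.find?_eq_none.mp hrun kv hkv
        simp [hzk] at hz
      have hkdesc : kv.1 ≠ "desc" := by
        intro hzk
        have hz := List.find?_eq_none.mp hdesc kv hkv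
        simp [hzk] at hz
      unfold pvRank
      simp [PySem.Set.contains, PySem.Set.empty, List.contains_eq_mem, hkon, hkrun, hkdesc]
    rw [second_loop_filter entry PySem.Set.empty hs]
    try simp
  next =>
    have hs : ∀ kv ∈ entry, (PySem.Set.contains (PySem.Set.add PySem.Set.empty "desc") kv.1 = true ↔ ¬ pvRank kv.1 = 3) := by
      intro kv hkv
      have hkon : kv.1 ≠ "on" := by
        intro hzk
        have hz := List.find?_eq_none.mp hon kv hkv
        simp [hzk] at hz
      have hkrun : kv.1 ≠ "run" := by
        intro hzk
        have hz := List.find?_eq_none.mp hrun kv hkv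
        simp [hzk] at hz
      have hseen : (PySem.Set.add PySem.Set.empty "desc") = (["desc"] : List String) := by decide
      rw [hseen]
      unfold pvRank
      by_cases edesc : kv.1 = "desc" <;> simp_all [PySem.Set.contains, PySem.Set.empty, List.contains_eq_mem, hkon, hkrun]
    rw [second_loop_filter entry (PySem.Set.add PySem.Set.empty "desc") hs]
    try simp
  next =>
    have hs : ∀ kv ∈ entry, (PySem.Set.contains (PySem.Set.add PySem.Set.empty "run") kv.1 = true ↔ ¬ pvRank kv.1 = 3) := by
      intro kv hkv
      have hkon : kv.1 ≠ "on" := by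
        intro hzk
        have hz := List.find?_eq_none.mp hon kv hkv
        simp [hzk] at hz
      have hkdesc : kv.1 ≠ "desc" := by
        intro hzk
        have hz := List.find?_eq_none.mp hdesc kv hkv
        simp [hzk] at hz
      have hseen : (PySem.Set.add PySem.Set.empty "run") = (["run"] : List String) := by decide
      rw [hseen]
      unfold pvRank
      by_cases erun : kv.1 = "run" <;> simp_all [PySem.Set.contains, PySem.Set.empty, List.contains_eq_mem, hkon, hkdesc]
    rw [second_loop_filter entry (PySem.Set.add PySem.Set.empty "run") hs]
    try simp
  next =>
    have hs : ∀ kv ∈ entry, (PySem.Set.contains (PySem.Set.add (PySem.Set.add PySem.Set.empty "run") "desc") kv.1 = true ↔ ¬ pvRank kv.1 = 3) := by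
      intro kv hkv
      have hkon : kv.1 ≠ "on" := by
        intro hzk
        have hz := List.find?_eq_none.mp hon kv hkv
        simp [hzk] at hz
      have hseen : (PySem.Set.add (PySem.Set.add PySem.Set.empty "run") "desc") = (["run", "desc"] : List String) := by decide
      rw [hseen]
      unfold pvRank
      by_cases erun : kv.1 = "run" <;> by_cases edesc : kv.1 = "desc" <;> simp_all [PySem.Set.contains, PySem.Set.empty, List.contains_eq_mem, hkon]
    rw [second_loop_filter entry (PySem.Set.add (PySem.Set.add PySem.Set.empty "run") "desc") hs]
    try simp
  next =>
    have hs : ∀ kv ∈ entry, (PySem.Set.contains (PySem.Set.add PySem.Set.empty "on") kv.1 = true ↔ ¬ pvRank kv.1 = 3) := by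
      intro kv hkv
      have hkrun : kv.1 ≠ "run" := by
        intro hzk
        have hz := List.find?_eq_none.mp hrun kv hkv
        simp [hzk] at hz
      have hkdesc : kv.1 ≠ "desc" := by
        intro hzk
        have hz := List.find?_eq_none.mp hdesc kv hkv
        simp [hzk] at hz
      have hseen : (PySem.Set.add PySem.Set.empty "on") = (["on"] : List String) := by decide
      rw [hseen]
      unfold pvRank
      by_cases eon : kv.1 = "on" <;> simp_all [PySem.Set.contains, PySem.Set.empty, List.contains_eq_mem, hkrun, hkdesc]
    rw [second_loop_filter entry (PySem.Set.add PySem.Set.empty "on") hs]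
    try simp
  next =>
    have hs : ∀ kv ∈ entry, (PySem.Set.contains (PySem.Set.add (PySem.Set.add PySem.Set.empty "on") "desc") kv.1 = true ↔ ¬ pvRank kv.1 = 3) := by
      intro kv hkv
      have hkrun : kv.1 ≠ "run" := by
        intro hzk
        have hz := List.find?_eq_none.mp hrun kv hkv
        simp [hzk] at hz
      have hseen : (PySem.Set.add (PySem.Set.add PySem.Set.empty "on") "desc") = (["on", "desc"] : List String) := by decide
      rw [hseen]
      unfold pvRank
      by_cases eon : kv.1 = "on" <;> by_cases edesc : kv.1 = "desc" <;> simp_all [PySem.Set.contains, PySem.Set.empty, List.contains_eq_mem, hkrun]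
    rw [second_loop_filter entry (PySem.Set.add (PySem.Set.add PySem.Set.empty "on") "desc") hs]
    try simp
  next =>
    have hs : ∀ kv ∈ entry, (PySem.Set.contains (PySem.Set.add (PySem.Set.add PySem.Set.empty "on") "run") kv.1 = true ↔ ¬ pvRank kv.1 = 3) := by
      intro kv hkv
      have hkdesc : kv.1 ≠ "desc" := by
        intro hzk
        have hz := List.find?_eq_none.mp hdesc kv hkv
        simp [hzk] at hz
      have hseen : (PySem.Set.add (PySem.Set.add PySem.Set.empty "on") "run") = (["on", "run"] : List String) := by decide
      rw [hseen]
      unfold pvRank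
      by_cases eon : kv.1 = "on" <;> by_cases erun : kv.1 = "run" <;> simp_all [PySem.Set.contains, PySem.Set.empty, List.contains_eq_mem, hkdesc]
    rw [second_loop_filter entry (PySem.Set.add (PySem.Set.add PySem.Set.empty "on") "run") hs]
    try simp
  next =>
    have hs : ∀ kv ∈ entry, (PySem.Set.contains (PySem.Set.add (PySem.Set.add (PySem.Set.add PySem.Set.empty "on") "run") "desc") kv.1 = true ↔ ¬ pvRank kv.1 = 3) := by
      intro kv hkv
      have hseen : (PySem.Set.add (PySem.Set.add (PySem.Set.add PySem.Set.empty "on") "run") "desc") = (["on", "run", "desc"] : List String) := by decide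
      rw [hseen]
      unfold pvRank
      by_cases eon : kv.1 = "on" <;> by_cases erun : kv.1 = "run" <;> by_cases edesc : kv.1 = "desc" <;> simp_all [PySem.Set.contains, PySem.Set.empty, List.contains_eq_mem]
    rw [second_loop_filter entry (PySem.Set.add (PySem.Set.add (PySem.Set.add PySem.Set.empty "on") "run") "desc") hs]
    try simp
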